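-- pv_equiv track=rewrite | github.com/DemianSespere/Algoritmos1 | PARCIALES-PYTHON/Mi_Parcial.py | torneo_de_gallinas
-- ===== SOURCE A (Python) =====
-- def choque(estrategia1:str,estrategia2:str)->bool:
--     res:bool = False
--     if estrategia1 == "me la banco y no me desvio" and estrategia2 == "me la banco y no me desvio":
--         res = True
--     return res
--
-- def ambos_gallinas(estrategia1:str,estrategia2:str)->bool:
--     res:bool = False
--     if estrategia1 == "me desvio siempre" and estrategia2 == "me desvio siempre":
--         res = True
--     return res
--
-- def torneo_de_gallinas(estrategias: dict[str,str]) -> dict[str,int]: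
--     jugadores:list[str] = estrategias.keys()
--     estrategia:list[str] = estrategias.values()
--     contador:int = 0
--     res:dict[str,int] = {}
--     for jugador in jugadores:
--         jugada:str = estrategias[jugador]
--         #Veo el duelo del jugador contra el resto
--         for i in estrategia:
--             if choque(jugada,i):
--                 contador -=5
--             elif ambos_gallinas(jugada,i):
--                 contador -=10
--             else: #uno solo fue gallina y lo veo a continuacion
--                 if jugada == "me la banco y no me desvio":
--                     contador +=10
--                 else:
--                     contador -=15
--         #Aca le sumo puntos porque en el anterior ciclo for, tomo en cuenta su propio duelo por lo tanto le sumo los puntos que perdio por ese duelo.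
--         if jugada == "me la banco y no me desvio":
--             contador += 5
--         else:
--             contador += 10
--         res[jugador] = contador #agrego al resultado el jugador con sus respesctivos puntos
--         contador = 0 #reinicio el contador
--     return res
-- ===== SOURCE B (Python) =====
-- def torneo_de_gallinas(estrategias: dict[str, str]) -> dict[str, int]:
--     # Count the strategy types once, then score each player arithmetically: O(n) instead of O(n^2).
--     vals = list(estrategias.values())
--     n = len(vals)
--     nb = vals.count("me la banco y no me desvio")
--     nd = vals.count("me desvio siempre")
--     res: dict[str, int] = {}
--     for jugador, jugada in estrategias.items():
--         if jugada == "me la banco y no me desvio":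
--             res[jugador] = 10 * n - 15 * nb + 5
--         elif jugada == "me desvio siempre":
--             res[jugador] = 5 * nd - 15 * n + 10
--         else:
--             res[jugador] = 10 - 15 * n
--     return res
-- ===== Notes on version B (the rewrite author's own statement) =====
-- stated objective: faster
-- what changed: B counts the two strategy strings once and computes every player's score by a closed arithmetic formula from those counts, replacing A's inner duel loop over all values for each player.
import Mathlib
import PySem

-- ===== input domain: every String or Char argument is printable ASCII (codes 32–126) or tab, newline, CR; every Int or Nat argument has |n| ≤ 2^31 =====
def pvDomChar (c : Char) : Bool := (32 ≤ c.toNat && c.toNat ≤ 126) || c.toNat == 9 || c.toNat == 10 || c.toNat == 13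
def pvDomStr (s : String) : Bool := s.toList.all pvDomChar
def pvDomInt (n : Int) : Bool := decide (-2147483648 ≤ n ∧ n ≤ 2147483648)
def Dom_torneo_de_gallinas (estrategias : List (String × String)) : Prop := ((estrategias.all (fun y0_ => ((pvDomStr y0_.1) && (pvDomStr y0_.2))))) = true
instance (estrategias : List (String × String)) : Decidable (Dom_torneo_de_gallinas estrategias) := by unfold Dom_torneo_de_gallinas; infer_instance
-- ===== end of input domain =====

-- B replaces A's quadratic all-pairs duel loop by counting the strategy types once and scoring each
-- player with a closed arithmetic formula (objective: faster, asymptotic O(n^2) → O(n)).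

-- ===== PORT A =====
def choque (estrategia1 : String) (estrategia2 : String) : Bool :=
  let res := false
  let res := if estrategia1 == "me la banco y no me desvio" && estrategia2 == "me la banco y no me desvio" then true else res
  res

def ambos_gallinas (estrategia1 : String) (estrategia2 : String) : Bool :=
  let res := false
  let res := if estrategia1 == "me desvio siempre" && estrategia2 == "me desvio siempre" then true else res
  res

def torneo_de_gallinas (estrategias : List (String × String)) : List (String × Int) :=
  let d := PySem.Dict.ofList estrategias
  let jugadores := PySem.Dict.keys d
  let estrategia := PySem.Dict.values d
  let res := jugadores.foldl (fun (res : PySem.Dict String Int) jugador =>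
    -- estrategias[jugador]: jugador comes from d.keys, so the key is present and getD never takes the default
    let jugada := PySem.Dict.getD d jugador ""
    let contador : Int := estrategia.foldl (fun contador i =>
      if choque jugada i then contador - 5
      else if ambos_gallinas jugada i then contador - 10
      else if jugada == "me la banco y no me desvio" then contador + 10
      else contador - 15) 0
    let contador := if jugada == "me la banco y no me desvio" then contador + 5 else contador + 10
    PySem.Dict.insert res jugador contador) PySem.Dict.empty
  PySem.Dict.items res

-- ===== PORT B =====
def puntaje_alt (n : Int) (nb : Int) (nd : Int) (jugada : String) : Int :=
  if jugada == "me la banco y no me desvio" then 10 * n - 15 * nb + 5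
  else if jugada == "me desvio siempre" then 5 * nd - 15 * n + 10
  else 10 - 15 * n

def torneo_de_gallinas_alt (estrategias : List (String × String)) : List (String × Int) :=
  let d := PySem.Dict.ofList estrategias
  let vals := PySem.Dict.values d
  let n : Int := vals.length
  let nb : Int := vals.count "me la banco y no me desvio"
  let nd : Int := vals.count "me desvio siempre"
  let res := (PySem.Dict.items d).foldl (fun (res : PySem.Dict String Int) p =>
    PySem.Dict.insert res p.1 (puntaje_alt n nb nd p.2)) PySem.Dict.empty
  PySem.Dict.items res

-- ===== PRECONDITION & SPEC =====
def Spec_torneo_de_gallinas (estrategias : List (String × String)) (out : List (String × Int)) : Prop := out = torneo_de_gallinas_alt estrategias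
instance (estrategias : List (String × String)) (out : List (String × Int)) : Decidable (Spec_torneo_de_gallinas estrategias out) := by unfold Spec_torneo_de_gallinas; infer_instance

-- ===== CLAIM (what is proved, stated in full; the proofs are below) =====
def Claim_equal_torneo_de_gallinas : Prop := ∀ (estrategias : List (String × String)), Dom_torneo_de_gallinas estrategias → Spec_torneo_de_gallinas estrategias (torneo_de_gallinas estrategias)

-- ===== LEMMAS AND PROOFS =====

-- the inner duel loop when jugada = "me la banco y no me desvio"
theorem foldl_banco (l : List String) (c : Int) :
    l.foldl (fun contador i => if i == "me la banco y no me desvio" then contador - 5 else contador + 10) c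
      = c + 10 * l.length - 15 * l.count "me la banco y no me desvio" := by
  induction l generalizing c with
  | nil => simp
  | cons a l ih =>
    rw [List.foldl_cons, ih]
    by_cases h : a = "me la banco y no me desvio" <;> simp [h] <;> omega

-- the inner duel loop when jugada = "me desvio siempre"
theorem foldl_desvio (l : List String) (c : Int) :
    l.foldl (fun contador i => if i == "me desvio siempre" then contador - 10 else contador - 15) c
      = c + 5 * l.count "me desvio siempre" - 15 * l.length := by
  induction l generalizing c with
  | nil => simp
  | cons a l ih =>
    rw [List.foldl_cons, ih]
    by_cases h : a = "me desvio siempre" <;> simp [h] <;> omega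

-- the inner duel loop when jugada is any other string
theorem foldl_otro (l : List String) (c : Int) :
    l.foldl (fun contador (_ : String) => contador - 15) c = c - 15 * l.length := by
  induction l generalizing c with
  | nil => simp
  | cons a l ih => rw [List.foldl_cons, ih]; push_cast [List.length_cons]; ring

-- A's per-player score (inner loop plus the self-duel adjustment) equals B's closed formula
theorem score_eq (vals : List String) (jugada : String) :
    (if jugada == "me la banco y no me desvio" then
        (vals.foldl (fun contador i =>
          if choque jugada i then contador - 5
          else if ambos_gallinas jugada i then contador - 10
          else if jugada == "me la banco y no me desvio" then contador + 10
          else contador - 15) 0) + 5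
     else
        (vals.foldl (fun contador i =>
          if choque jugada i then contador - 5
          else if ambos_gallinas jugada i then contador - 10
          else if jugada == "me la banco y no me desvio" then contador + 10
          else contador - 15) 0) + 10)
      = puntaje_alt vals.length (vals.count "me la banco y no me desvio")
          (vals.count "me desvio siempre") jugada := by
  by_cases hb : jugada = "me la banco y no me desvio"
  · have hstep : (fun (contador : Int) (i : String) =>
        if choque jugada i then contador - 5
        else if ambos_gallinas jugada i then contador - 10
        else if jugada == "me la banco y no me desvio" then contador + 10
        else contador - 15)
      = (fun contador i => if i == "me la banco y no me desvio" then contador - 5 else contador + 10) := by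
      funext c i
      by_cases h : i = "me la banco y no me desvio" <;>
        simp [choque, ambos_gallinas, hb, h]
    rw [hstep, foldl_banco]
    simp [puntaje_alt, hb]
  · by_cases hd : jugada = "me desvio siempre"
    · have hstep : (fun (contador : Int) (i : String) =>
          if choque jugada i then contador - 5
          else if ambos_gallinas jugada i then contador - 10
          else if jugada == "me la banco y no me desvio" then contador + 10
          else contador - 15)
        = (fun contador i => if i == "me desvio siempre" then contador - 10 else contador - 15) := by
        funext c i
        by_cases h : i = "me desvio siempre" <;>
          simp [choque, ambos_gallinas, hd, h]
      rw [hstep, foldl_desvio]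
      simp [puntaje_alt, hd]
    · have hstep : (fun (contador : Int) (i : String) =>
          if choque jugada i then contador - 5
          else if ambos_gallinas jugada i then contador - 10
          else if jugada == "me la banco y no me desvio" then contador + 10
          else contador - 15)
        = (fun (contador : Int) (_ : String) => contador - 15) := by
        funext c i
        simp [choque, ambos_gallinas, hb, hd]
      rw [hstep, foldl_otro]
      simp [puntaje_alt, hb, hd]
      ring

-- ===== VERDICT (by name: the statement is the Claim_ definition above) =====
theorem torneo_de_gallinas_spec : Claim_equal_torneo_de_gallinas := by
  intro estrategias _
  unfold Spec_torneo_de_gallinas torneo_de_gallinas torneo_de_gallinas_alt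
  dsimp only
  have hnd : (PySem.Dict.ofList estrategias).keys.Nodup := PySem.Dict.nodup_keys_ofList estrategias
  rw [PySem.Dict.items_eq_map_keys (PySem.Dict.ofList estrategias) hnd ""]
  rw [List.foldl_map]
  congr 1
  congr 1
  funext res jugador
  exact congrArg (PySem.Dict.insert res jugador)
    (score_eq (PySem.Dict.values (PySem.Dict.ofList estrategias))
      (PySem.Dict.getD (PySem.Dict.ofList estrategias) jugador ""))
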